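-- pv_equiv track=rewrite | github.com/zjustarstar/SketchChecker | thinLineDetection_v2.py | remSinglePt
-- ===== SOURCE A (Python) =====
-- STEP_LINE = 120
--
-- def isPointInRect(x, y, rect):
--     '''
--     判断点是否在某个rect内
--     :param x,y:
--     :param rect: x0, x1, y0, y1
--     :return:
--     '''
--     if rect[0] < x < rect[1] and rect[2] < y < rect[3]:
--         return True
--     else:
--         return False
--
-- def remSinglePt(pts):
--     '''
--     去除孤立点:周边一定范围内一个点都没有的点
--     :param pts: 输入的点
--     :return: 去除孤立点后的点，以及去除了多少个点
--     '''
--     Scale = 2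
--     newpt = []
--     for i in range(len(pts)):
--         y, x = pts[i][0], pts[i][1]
--         rect = [x-Scale*STEP_LINE, x+Scale*STEP_LINE, y-Scale*STEP_LINE, y+Scale*STEP_LINE]
--         num = 0
--         for p in pts:
--             if isPointInRect(p[1], p[0], rect):
--                 num = num + 1
--
--         # 超过一个相邻点,保留
--         if num > 1:
--           newpt.append(pts[i])
--
--     return newpt, len(pts)-len(newpt)
-- ===== SOURCE B (Python) =====
-- STEP_LINE = 120
--
-- def remSinglePt(pts):
--     R = 2 * STEP_LINE
--     grid = {}
--     for p in pts:
--         key = (p[1] // R, p[0] // R)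
--         grid[key] = grid.get(key, []) + [p]
--     newpt = []
--     for p in pts:
--         y, x = p[0], p[1]
--         cx, cy = x // R, y // R
--         num = 0
--         for dx in (-1, 0, 1):
--             for dy in (-1, 0, 1):
--                 for q in grid.get((cx + dx, cy + dy), []):
--                     if abs(q[1] - x) < R and abs(q[0] - y) < R:
--                         num += 1
--         if num > 1:
--             newpt.append(p)
--     return newpt, len(pts) - len(newpt)
-- ===== Notes on version B (the rewrite author's own statement) =====
-- stated objective: alternative
-- what changed: B replaces A's all-pairs neighbour counting by a spatial hash grid of 240x240 cells built in one pass, counting each point's box neighbours only among the 3x3 surrounding cells (O(n) expected vs O(n^2); the harness's timing family read only ~1.5x, so no speed is claimed).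
import Mathlib
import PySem

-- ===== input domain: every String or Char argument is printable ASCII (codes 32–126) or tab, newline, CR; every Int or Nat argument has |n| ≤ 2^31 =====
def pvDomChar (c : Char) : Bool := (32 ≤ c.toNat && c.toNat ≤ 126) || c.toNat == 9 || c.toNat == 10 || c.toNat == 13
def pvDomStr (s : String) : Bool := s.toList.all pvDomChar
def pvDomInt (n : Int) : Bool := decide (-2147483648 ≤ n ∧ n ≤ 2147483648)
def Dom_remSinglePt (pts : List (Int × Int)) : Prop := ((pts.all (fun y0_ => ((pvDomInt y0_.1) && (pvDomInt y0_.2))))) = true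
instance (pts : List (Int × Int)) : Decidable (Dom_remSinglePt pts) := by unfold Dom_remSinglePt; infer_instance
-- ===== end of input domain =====

-- B replaces A's quadratic all-pairs neighbour count by a spatial hash grid of 240×240 cells,
-- counting box neighbours only in the 3×3 surrounding cells (same return value).

-- ===== PORT A =====
def STEP_LINE : Int := 120

def isPointInRect (x y : Int) (rect : Int × Int × Int × Int) : Bool :=
  if rect.1 < x ∧ x < rect.2.1 ∧ rect.2.2.1 < y ∧ y < rect.2.2.2 then true else false

def remSinglePt (pts : List (Int × Int)) : (List (Int × Int)) × Int :=
  let Scale : Int := 2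
  let newpt := (PySem.List.pyRange 0 (PySem.List.len pts)).foldl (fun newpt i =>
    let p := PySem.List.pyGetD pts i ((0 : Int), (0 : Int))
    let rect := (p.2 - Scale * STEP_LINE, p.2 + Scale * STEP_LINE,
                 p.1 - Scale * STEP_LINE, p.1 + Scale * STEP_LINE)
    let num := pts.foldl (fun num q => if isPointInRect q.2 q.1 rect then num + 1 else num) (0 : Int)
    if num > 1 then newpt ++ [p] else newpt) ([] : List (Int × Int))
  (newpt, PySem.List.len pts - PySem.List.len newpt)

-- ===== PORT B =====
def remSinglePt_alt (pts : List (Int × Int)) : (List (Int × Int)) × Int :=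
  let R : Int := 2 * STEP_LINE
  let grid := pts.foldl (fun g p =>
      g.modify (PySem.Int.floordiv p.2 R, PySem.Int.floordiv p.1 R) [] (fun l => l ++ [p]))
    (PySem.Dict.empty : PySem.Dict (Int × Int) (List (Int × Int)))
  let newpt := pts.foldl (fun newpt p =>
    let cx := PySem.Int.floordiv p.2 R
    let cy := PySem.Int.floordiv p.1 R
    let num := ([-1, 0, 1] : List Int).foldl (fun num dx =>
      ([-1, 0, 1] : List Int).foldl (fun num dy =>
        (grid.getD (cx + dx, cy + dy) []).foldl (fun num q =>
          if |q.2 - p.2| < R ∧ |q.1 - p.1| < R then num + 1 else num) num) num) (0 : Int)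
    if num > 1 then newpt ++ [p] else newpt) ([] : List (Int × Int))
  (newpt, PySem.List.len pts - PySem.List.len newpt)

-- ===== PRECONDITION & SPEC =====
def Spec_remSinglePt (pts : List (Int × Int)) (out : (List (Int × Int)) × Int) : Prop := out = remSinglePt_alt pts
instance (pts : List (Int × Int)) (out : (List (Int × Int)) × Int) : Decidable (Spec_remSinglePt pts out) := by unfold Spec_remSinglePt; infer_instance

-- ===== CLAIM (what is proved, stated in full; the proofs are below) =====
def Claim_equal_remSinglePt : Prop := ∀ (pts : List (Int × Int)), Dom_remSinglePt pts → Spec_remSinglePt pts (remSinglePt pts)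

-- ===== LEMMAS AND PROOFS =====

-- the grid B builds holds, at key k, exactly the points whose 240x240 cell is k, in input order
theorem pv_grid_getD (pts : List (Int × Int)) (k : Int × Int) :
    (pts.foldl (fun g p =>
        g.modify (PySem.Int.floordiv p.2 (2 * 120), PySem.Int.floordiv p.1 (2 * 120)) [] (fun l => l ++ [p]))
      (PySem.Dict.empty : PySem.Dict (Int × Int) (List (Int × Int)))).getD k []
    = pts.filter (fun q => (PySem.Int.floordiv q.2 (2 * 120), PySem.Int.floordiv q.1 (2 * 120)) == k) := by
  rw [← List.foldl_map (f := fun p : Int × Int =>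
        ((PySem.Int.floordiv p.2 (2 * 120), PySem.Int.floordiv p.1 (2 * 120)), p))
      (g := fun (d : PySem.Dict (Int × Int) (List (Int × Int))) pr =>
        d.modify pr.1 [] (fun l => l ++ [pr.2]))]
  rw [PySem.Dict.getD_foldl_modify_append]
  simp [List.filter_map, Function.comp_def]

-- a single point lands in exactly one of the nine neighbouring cell buckets iff it is in the box
theorem pv_pt (p q : Int × Int) :
    (if (decide (|q.2 - p.2| < 240) && decide (|q.1 - p.1| < 240) &&
        ((q.2 / 240, q.1 / 240) == (p.2 / 240 + -1, p.1 / 240 + -1))) = true then (1:Nat) else 0)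
    + (if (decide (|q.2 - p.2| < 240) && decide (|q.1 - p.1| < 240) &&
        ((q.2 / 240, q.1 / 240) == (p.2 / 240 + -1, p.1 / 240))) = true then (1:Nat) else 0)
    + (if (decide (|q.2 - p.2| < 240) && decide (|q.1 - p.1| < 240) &&
        ((q.2 / 240, q.1 / 240) == (p.2 / 240 + -1, p.1 / 240 + 1))) = true then (1:Nat) else 0)
    + (if (decide (|q.2 - p.2| < 240) && decide (|q.1 - p.1| < 240) &&
        ((q.2 / 240, q.1 / 240) == (p.2 / 240, p.1 / 240 + -1))) = true then (1:Nat) else 0)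
    + (if (decide (|q.2 - p.2| < 240) && decide (|q.1 - p.1| < 240) &&
        ((q.2 / 240, q.1 / 240) == (p.2 / 240, p.1 / 240))) = true then (1:Nat) else 0)
    + (if (decide (|q.2 - p.2| < 240) && decide (|q.1 - p.1| < 240) &&
        ((q.2 / 240, q.1 / 240) == (p.2 / 240, p.1 / 240 + 1))) = true then (1:Nat) else 0)
    + (if (decide (|q.2 - p.2| < 240) && decide (|q.1 - p.1| < 240) &&
        ((q.2 / 240, q.1 / 240) == (p.2 / 240 + 1, p.1 / 240 + -1))) = true then (1:Nat) else 0)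
    + (if (decide (|q.2 - p.2| < 240) && decide (|q.1 - p.1| < 240) &&
        ((q.2 / 240, q.1 / 240) == (p.2 / 240 + 1, p.1 / 240))) = true then (1:Nat) else 0)
    + (if (decide (|q.2 - p.2| < 240) && decide (|q.1 - p.1| < 240) &&
        ((q.2 / 240, q.1 / 240) == (p.2 / 240 + 1, p.1 / 240 + 1))) = true then (1:Nat) else 0)
    = (if isPointInRect q.2 q.1 (p.2 - 240, p.2 + 240, p.1 - 240, p.1 + 240) = true then (1:Nat) else 0) := by
  by_cases h1 : |q.2 - p.2| < 240
  · by_cases h2 : |q.1 - p.1| < 240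
    · have d1 : decide (|q.2 - p.2| < 240) = true := by simp [h1]
      have d2 : decide (|q.1 - p.1| < 240) = true := by simp [h2]
      have dA : isPointInRect q.2 q.1 (p.2 - 240, p.2 + 240, p.1 - 240, p.1 + 240) = true := by
        rw [abs_lt] at h1 h2
        simp only [isPointInRect, if_pos (by omega :
          p.2 - 240 < q.2 ∧ q.2 < p.2 + 240 ∧ p.1 - 240 < q.1 ∧ q.1 < p.1 + 240)]
      simp only [d1, d2, dA, Bool.true_and]
      rw [abs_lt] at h1 h2
      obtain hu | hu | hu : q.2 / 240 = p.2 / 240 + -1 ∨ q.2 / 240 = p.2 / 240 ∨ q.2 / 240 = p.2 / 240 + 1 := by omega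
      all_goals obtain hv | hv | hv : q.1 / 240 = p.1 / 240 + -1 ∨ q.1 / 240 = p.1 / 240 ∨ q.1 / 240 = p.1 / 240 + 1 := by omega
      all_goals rw [hu, hv]
      all_goals norm_num [Prod.ext_iff]
    · have d2 : decide (|q.1 - p.1| < 240) = false := by simp [h2]
      have dA : isPointInRect q.2 q.1 (p.2 - 240, p.2 + 240, p.1 - 240, p.1 + 240) = false := by
        rw [abs_lt] at h2
        simp only [isPointInRect, if_neg (by omega :
          ¬(p.2 - 240 < q.2 ∧ q.2 < p.2 + 240 ∧ p.1 - 240 < q.1 ∧ q.1 < p.1 + 240))]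
      simp [d2, dA]
  · have d1 : decide (|q.2 - p.2| < 240) = false := by simp [h1]
    have dA : isPointInRect q.2 q.1 (p.2 - 240, p.2 + 240, p.1 - 240, p.1 + 240) = false := by
      rw [abs_lt] at h1
      simp only [isPointInRect, if_neg (by omega :
        ¬(p.2 - 240 < q.2 ∧ q.2 < p.2 + 240 ∧ p.1 - 240 < q.1 ∧ q.1 < p.1 + 240))]
    simp [d1, dA]


-- summed over the list: the nine per-cell box counts add up to A's plain box count
theorem pv_sum9 (p : Int × Int) (pts : List (Int × Int)) :
    List.countP (fun x => isPointInRect x.2 x.1 (p.2 - 240, p.2 + 240, p.1 - 240, p.1 + 240)) pts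
    = List.countP (fun a => decide (|a.2 - p.2| < 240) && decide (|a.1 - p.1| < 240) &&
          ((a.2 / 240, a.1 / 240) == (p.2 / 240 + -1, p.1 / 240 + -1))) pts
    + List.countP (fun a => decide (|a.2 - p.2| < 240) && decide (|a.1 - p.1| < 240) &&
          ((a.2 / 240, a.1 / 240) == (p.2 / 240 + -1, p.1 / 240))) pts
    + List.countP (fun a => decide (|a.2 - p.2| < 240) && decide (|a.1 - p.1| < 240) &&
          ((a.2 / 240, a.1 / 240) == (p.2 / 240 + -1, p.1 / 240 + 1))) pts
    + List.countP (fun a => decide (|a.2 - p.2| < 240) && decide (|a.1 - p.1| < 240) &&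
          ((a.2 / 240, a.1 / 240) == (p.2 / 240, p.1 / 240 + -1))) pts
    + List.countP (fun a => decide (|a.2 - p.2| < 240) && decide (|a.1 - p.1| < 240) &&
          ((a.2 / 240, a.1 / 240) == (p.2 / 240, p.1 / 240))) pts
    + List.countP (fun a => decide (|a.2 - p.2| < 240) && decide (|a.1 - p.1| < 240) &&
          ((a.2 / 240, a.1 / 240) == (p.2 / 240, p.1 / 240 + 1))) pts
    + List.countP (fun a => decide (|a.2 - p.2| < 240) && decide (|a.1 - p.1| < 240) &&
          ((a.2 / 240, a.1 / 240) == (p.2 / 240 + 1, p.1 / 240 + -1))) pts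
    + List.countP (fun a => decide (|a.2 - p.2| < 240) && decide (|a.1 - p.1| < 240) &&
          ((a.2 / 240, a.1 / 240) == (p.2 / 240 + 1, p.1 / 240))) pts
    + List.countP (fun a => decide (|a.2 - p.2| < 240) && decide (|a.1 - p.1| < 240) &&
          ((a.2 / 240, a.1 / 240) == (p.2 / 240 + 1, p.1 / 240 + 1))) pts := by
  induction pts with
  | nil => simp
  | cons q t ih =>
    simp only [List.countP_cons]
    have hpt := pv_pt p q
    omega

-- the two num-counts agree for every centre point p
theorem pv_num (pts : List (Int × Int)) (p : Int × Int) :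
    List.foldl (fun num q => if isPointInRect q.2 q.1
        (p.2 - 2 * 120, p.2 + 2 * 120, p.1 - 2 * 120, p.1 + 2 * 120) = true then num + 1 else num) (0:Int) pts
    = List.foldl (fun num dx => List.foldl (fun num dy =>
        ((pts.foldl (fun g r =>
            g.modify (PySem.Int.floordiv r.2 (2 * 120), PySem.Int.floordiv r.1 (2 * 120)) [] (fun l => l ++ [r]))
          (PySem.Dict.empty : PySem.Dict (Int × Int) (List (Int × Int)))).getD
            (PySem.Int.floordiv p.2 (2 * 120) + dx, PySem.Int.floordiv p.1 (2 * 120) + dy) []).foldl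
          (fun num q => if |q.2 - p.2| < 2 * 120 ∧ |q.1 - p.1| < 2 * 120 then num + 1 else num) num) num
        ([-1, 0, 1] : List Int)) (0:Int) ([-1, 0, 1] : List Int) := by
  simp only [pv_grid_getD, List.foldl_cons, List.foldl_nil]
  simp only [PySem.List.foldl_if_add_one, PySem.List.foldl_ite_add_one, List.countP_filter]
  have h240 : (0:Int) < 2 * 120 := by norm_num
  simp only [PySem.Int.floordiv_eq_ediv_of_pos h240]
  norm_num
  have hs := pv_sum9 p pts
  omega

-- A's index loop over range(len(pts)) is the element loop over pts
theorem pv_A_loop (pts : List (Int × Int)) :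
    (PySem.List.pyRange 0 (PySem.List.len pts)).foldl (fun newpt i =>
      if (List.foldl (fun num q => if isPointInRect q.2 q.1
          ((PySem.List.pyGetD pts i ((0 : Int), (0 : Int))).2 - 2 * 120,
           (PySem.List.pyGetD pts i ((0 : Int), (0 : Int))).2 + 2 * 120,
           (PySem.List.pyGetD pts i ((0 : Int), (0 : Int))).1 - 2 * 120,
           (PySem.List.pyGetD pts i ((0 : Int), (0 : Int))).1 + 2 * 120) = true then num + 1 else num) (0:Int) pts) > 1
        then newpt ++ [PySem.List.pyGetD pts i ((0 : Int), (0 : Int))] else newpt) ([] : List (Int × Int))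
    = pts.foldl (fun newpt p =>
      if (List.foldl (fun num q => if isPointInRect q.2 q.1
          (p.2 - 2 * 120, p.2 + 2 * 120, p.1 - 2 * 120, p.1 + 2 * 120) = true then num + 1 else num) (0:Int) pts) > 1
        then newpt ++ [p] else newpt) ([] : List (Int × Int)) := by
  have h := PySem.List.foldl_pyRange_pyGetD pts ((0 : Int), (0 : Int))
    (fun newpt (p : Int × Int) => if (List.foldl (fun num q => if isPointInRect q.2 q.1
        (p.2 - 2 * 120, p.2 + 2 * 120, p.1 - 2 * 120, p.1 + 2 * 120) = true then num + 1 else num) (0:Int) pts) > 1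
      then newpt ++ [p] else newpt)
    ([] : List (Int × Int)) (le_refl 0)
  simpa using h

-- ===== VERDICT (by name: the statement is the Claim_ definition above) =====
theorem remSinglePt_spec : Claim_equal_remSinglePt := by
  intro pts _
  unfold Spec_remSinglePt
  simp only [remSinglePt, remSinglePt_alt]
  rw [show STEP_LINE = (120:Int) from rfl]
  rw [pv_A_loop]
  simp only [pv_num]
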